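-- pv_equiv track=rewrite | github.com/nuokey/Homework | Contest-1/4.py | find_ss
-- ===== SOURCE A (Python) =====
-- def levenshtein(s1, s2):
--     dp = [[0] * (len(s2) + 1) for k in range(len(s1) + 1)]
--     for i in range(len(s1) + 1):
--         dp[i][0] = i
--     for j in range(len(s2) + 1):
--         dp[0][j] = j
--     for i in range(1, len(s1) + 1):
--         for j in range(1, len(s2) + 1):
--             cost = 0 if s1[i - 1] == s2[j - 1] else 1
--             dp[i][j] = min(dp[i - 1][j] + 1,
--                            dp[i][j - 1] + 1,
--                            dp[i - 1][j - 1] + cost)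
--     return dp[len(s1)][len(s2)]
--
-- def find_ss(a, b, d):
--     best_index = -1
--     best_length = int()
--     for i in range(len(a)):
--         for c in range(i + 1, len(a) + 1):
--             s = a[i:c]
--             distance = levenshtein(s, b)
--             if distance <= d:
--                 if (i < best_index) or (best_index == -1) or (len(s) < best_length):
--                     best_index = i
--                     best_length = len(s)
--     return best_index, best_length
-- ===== SOURCE B (Python) =====
-- def find_ss(a, b, d):
--     # Per start index, extend the substring one character at a time, reusing the
--     # edit-distance DP row; stop at the first (shortest) match for that start.
--     nb = len(b)
--     best_index = -1
--     best_length = 0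
--     for i in range(len(a)):
--         row = list(range(nb + 1))
--         found = None
--         for k in range(i, len(a)):
--             ch = a[k]
--             new = [row[0] + 1]
--             for j in range(1, nb + 1):
--                 cost = 0 if ch == b[j - 1] else 1
--                 new.append(min(new[j - 1] + 1, row[j] + 1, row[j - 1] + cost))
--             row = new
--             if row[nb] <= d:
--                 found = k - i + 1
--                 break
--         if found is not None and (best_index == -1 or found < best_length):
--             best_index = i
--             best_length = found
--     return best_index, best_length
-- ===== Notes on version B (the rewrite author's own statement) =====
-- stated objective: faster
-- what changed: Instead of recomputing a full Levenshtein DP table for every substring a[i:c] (quartic work), B keeps one DP row per start index i, extends it by one character at a time, and stops at the first (shortest) matching length for that start; the final bookkeeping keeps the first start achieving the minimal length, exactly as A's update rule does.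
import Mathlib
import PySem

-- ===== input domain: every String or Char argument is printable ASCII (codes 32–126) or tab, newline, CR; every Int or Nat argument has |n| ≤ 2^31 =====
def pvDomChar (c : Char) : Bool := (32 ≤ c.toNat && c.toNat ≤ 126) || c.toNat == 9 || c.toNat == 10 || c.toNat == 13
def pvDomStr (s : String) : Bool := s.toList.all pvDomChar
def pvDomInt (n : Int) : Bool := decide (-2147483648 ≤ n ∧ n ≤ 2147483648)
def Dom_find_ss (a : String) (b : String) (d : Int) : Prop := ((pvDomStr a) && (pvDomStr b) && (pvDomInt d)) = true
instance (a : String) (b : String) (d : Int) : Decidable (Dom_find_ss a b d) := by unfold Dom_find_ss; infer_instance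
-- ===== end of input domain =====

-- B replaces A's per-substring Levenshtein recomputation by incremental DP rows per start
-- index with an early stop at the first (shortest) match: objective 'faster' (asymptotic).
-- Both ports below are transliterations; all indexing in both Pythons is in range, so the
-- total `List.getD`/`Option` forms used are exact.

-- ===== PORT A =====
-- Python min(x, y, z) on ints
def pvMin3 (x y z : Int) : Int := min (min x y) z

-- literal port of A's `levenshtein` (the dp table is a list of rows; each in-place
-- assignment dp[i][j] = v is `List.set`; in-range reads dp[i][j] / s[i-1] are `List.getD`;
-- i = i0 + 1 and j = j0 + 1 run over range(1, len+1))
def levenshtein (s1 s2 : List Char) : Int :=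
  let dp0 : List (List Int) := List.replicate (s1.length + 1) (List.replicate (s2.length + 1) (0 : Int))
  let dp1 := (List.range (s1.length + 1)).foldl (fun dp i => dp.set i ((dp.getD i []).set 0 (i : Int))) dp0
  let dp2 := (List.range (s2.length + 1)).foldl (fun dp j => dp.set 0 ((dp.getD 0 []).set j (j : Int))) dp1
  let dp3 := (List.range s1.length).foldl (fun dp i0 =>
    (List.range s2.length).foldl (fun dp j0 =>
      dp.set (i0 + 1) ((dp.getD (i0 + 1) []).set (j0 + 1)
        (pvMin3 ((dp.getD i0 []).getD (j0 + 1) 0 + 1)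
                ((dp.getD (i0 + 1) []).getD j0 0 + 1)
                ((dp.getD i0 []).getD j0 0 + (if s1.getD i0 ' ' = s2.getD j0 ' ' then 0 else 1))))) dp) dp2
  (dp3.getD s1.length []).getD s2.length 0

def find_ss (a : String) (b : String) (d : Int) : List Int :=
  let al := a.toList
  let bl := b.toList
  let r := (List.range al.length).foldl (fun (st : Int × Int) (i : Nat) =>
    (PySem.List.pyRange ((i : Int) + 1) ((al.length : Int) + 1) 1).foldl (fun st c =>
      let s := PySem.List.slice al (some (i : Int)) (some c)
      let distance := levenshtein s bl
      if distance ≤ d then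
        if ((i : Int) < st.1) ∨ (st.1 = -1) ∨ ((s.length : Int) < st.2) then ((i : Int), (s.length : Int))
        else st
      else st) st) ((-1 : Int), (0 : Int))
  [r.1, r.2]


-- ===== PORT B =====
-- row = list(range(nb + 1))
def pvRow0 (n : Nat) : List Int := (List.range (n + 1)).map (fun j : Nat => (j : Int))

-- one extension step: from the DP row of (s, b) to the DP row of (s + ch, b),
-- built left to right (B's inner append loop over j = 1 .. nb; new[j-1] is new.getD j0)
def pvStepRow (bl : List Char) (row : List Int) (ch : Char) : List Int :=
  (List.range bl.length).foldl (fun new j0 =>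
    new ++ [pvMin3 (new.getD j0 0 + 1) (row.getD (j0 + 1) 0 + 1)
      (row.getD j0 0 + (if ch = bl.getD j0 ' ' then 0 else 1))])
    [row.getD 0 0 + 1]

-- B's inner `for k in range(i, len(a)): ... break` loop: scan the remaining characters,
-- stepping the row, returning the length of the first (shortest) match for this start
def pvScan (bl : List Char) (d : Int) (row : List Int) (rest : List Char) (len1 : Nat) : Option Nat :=
  match rest with
  | [] => none
  | ch :: rest' =>
    let row' := pvStepRow bl row ch
    if row'.getD bl.length 0 ≤ d then some (len1 + 1)
    else pvScan bl d row' rest' (len1 + 1)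
def find_ss_alt (a : String) (b : String) (d : Int) : List Int :=
  let al := a.toList
  let bl := b.toList
  let r := (List.range al.length).foldl (fun (st : Int × Int) (i : Nat) =>
    match pvScan bl d (pvRow0 bl.length) (al.drop i) 0 with
    | none => st
    | some L => if st.1 = -1 ∨ ((L : Int) < st.2) then ((i : Int), (L : Int)) else st)
    ((-1 : Int), (0 : Int))
  [r.1, r.2]

-- canonical form of one outer step, shared by both ports

-- ===== PRECONDITION & SPEC =====
def Spec_find_ss (a : String) (b : String) (d : Int) (out : List Int) : Prop := out = find_ss_alt a b d
instance (a : String) (b : String) (d : Int) (out : List Int) : Decidable (Spec_find_ss a b d out) := by unfold Spec_find_ss; infer_instance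

-- ===== CLAIM (what is proved, stated in full; the proofs are below) =====
def Claim_equal_find_ss : Prop := ∀ (a : String) (b : String) (d : Int), Dom_find_ss a b d → Spec_find_ss a b d (find_ss a b d)

-- ===== LEMMAS AND PROOFS =====

-- B's row iteration over a whole word; its final entry is the Levenshtein distance
def pvRows (bl : List Char) (s : List Char) : List Int := s.foldl (pvStepRow bl) (pvRow0 bl.length)
def pvLev (bl : List Char) (s : List Char) : Int := (pvRows bl s).getD bl.length 0

theorem foldl_app_pref {α β : Type} (h : List β → α → List β) :
    ∀ (l : List α) (init : List β), ∃ t, l.foldl (fun new x => new ++ (h new x)) init = init ++ t := by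
  intro l
  induction l with
  | nil => exact fun init => ⟨[], by simp⟩
  | cons x l ih =>
    intro init
    obtain ⟨t, ht⟩ := ih (init ++ h init x)
    exact ⟨h init x ++ t, by simp [ht]⟩

theorem pvStepRow_head (bl : List Char) (row : List Int) (ch : Char) :
    (pvStepRow bl row ch).getD 0 0 = row.getD 0 0 + 1 := by
  unfold pvStepRow
  obtain ⟨t, ht⟩ := foldl_app_pref (fun new j0 => [pvMin3 (new.getD j0 0 + 1) (row.getD (j0 + 1) 0 + 1)
      (row.getD j0 0 + (if ch = bl.getD j0 ' ' then 0 else 1))]) (List.range bl.length) [row.getD 0 0 + 1]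
  rw [ht]; simp

theorem pvRow0_getD (n k : Nat) (h : k ≤ n) : (pvRow0 n).getD k 0 = (k : Int) := by
  unfold pvRow0; exact PySem.List.getD_map_range (fun j => (j:Int)) (n+1) k 0 (by omega)

theorem pvRows_head (bl s : List Char) : (pvRows bl s).getD 0 0 = (s.length : Int) := by
  induction s using List.reverseRecOn with
  | nil =>
    simpa [pvRows] using pvRow0_getD bl.length 0 (by omega)
  | append_singleton s c ih =>
    simp only [pvRows, List.foldl_append, List.foldl_cons, List.foldl_nil] at ih ⊢
    rw [pvStepRow_head, ih]; simp

theorem getD_set_self {α : Type} (xs : List α) (n : Nat) (v d : α) (h : n < xs.length) :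
    (xs.set n v).getD n d = v := by
  simp [List.getD, h]

theorem getD_set_ne {α : Type} (xs : List α) (n m : Nat) (v d : α) (h : n ≠ m) :
    (xs.set n v).getD m d = xs.getD m d := by
  simp [List.getD, List.getElem?_set_ne h]
-- a fold that repeatedly overwrites row i (reading rows i and i', i' ≠ i) factors
-- through a fold on that row alone
theorem foldl_set_row {α : Type} (i i' : Nat) (dflt : α) (g : Nat → α → α → α)
    (hne : i' ≠ i) :
    ∀ (l : List Nat) (dp : List α), i < dp.length →
    l.foldl (fun dp j => dp.set i (g j (dp.getD i dflt) (dp.getD i' dflt))) dp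
      = dp.set i (l.foldl (fun r j => g j r (dp.getD i' dflt)) (dp.getD i dflt)) := by
  intro l
  induction l with
  | nil =>
    intro dp hi
    simp only [List.foldl_nil, List.getD, List.getElem?_eq_getElem hi, Option.getD_some,
      List.set_getElem_self]
  | cons j l ih =>
    intro dp hi
    simp only [List.foldl_cons]
    rw [ih _ (by simpa using hi)]
    have h1 : ∀ v, (dp.set i v).getD i' dflt = dp.getD i' dflt :=
      fun v => getD_set_ne dp i i' v dflt (Ne.symm hne)
    have h2 : ∀ v, (dp.set i v).getD i dflt = v := fun v => getD_set_self dp i v dflt hi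
    simp only [h1, h2, List.set_set]

theorem pvMin3_comm (x y z : Int) : pvMin3 x y z = pvMin3 y x z := by
  unfold pvMin3; rw [min_comm x y]

theorem getD_append_left {α : Type} (xs ys : List α) (n : Nat) (d : α) (h : n < xs.length) :
    (xs ++ ys).getD n d = xs.getD n d := by
  simp [List.getD, List.getElem?_append_left h]
-- A's in-place inner row loop builds B's appended row (invariant: suffix still zero)
theorem row_loop_aux (bl : List Char) (prev : List Int) (ch : Char) :
    ∀ k, k ≤ bl.length →
      ((List.range k).foldl (fun r j0 =>
          r.set (j0 + 1) (pvMin3 (prev.getD (j0 + 1) 0 + 1) (r.getD j0 0 + 1)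
            (prev.getD j0 0 + (if ch = bl.getD j0 ' ' then 0 else 1))))
        ((prev.getD 0 0 + 1) :: List.replicate bl.length 0)
        = (List.range k).foldl (fun new j0 =>
            new ++ [pvMin3 (new.getD j0 0 + 1) (prev.getD (j0 + 1) 0 + 1)
              (prev.getD j0 0 + (if ch = bl.getD j0 ' ' then 0 else 1))])
          [prev.getD 0 0 + 1] ++ List.replicate (bl.length - k) 0)
      ∧ ((List.range k).foldl (fun new j0 =>
            new ++ [pvMin3 (new.getD j0 0 + 1) (prev.getD (j0 + 1) 0 + 1)
              (prev.getD j0 0 + (if ch = bl.getD j0 ' ' then 0 else 1))])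
          [prev.getD 0 0 + 1]).length = k + 1 := by
  intro k
  induction k with
  | zero => intro _; simp
  | succ k ih =>
    intro hk
    obtain ⟨h1, h2⟩ := ih (by omega)
    rw [List.range_succ, List.foldl_append, List.foldl_append]
    simp only [List.foldl_cons, List.foldl_nil]
    set RHS := (List.range k).foldl (fun new j0 =>
            new ++ [pvMin3 (new.getD j0 0 + 1) (prev.getD (j0 + 1) 0 + 1)
              (prev.getD j0 0 + (if ch = bl.getD j0 ' ' then 0 else 1))])
          [prev.getD 0 0 + 1] with hR
    rw [h1]
    have hrep : List.replicate (bl.length - k) (0:Int) = 0 :: List.replicate (bl.length - (k+1)) 0 := by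
      have : bl.length - k = (bl.length - (k+1)) + 1 := by omega
      rw [this, List.replicate_succ]
    have hget : (RHS ++ List.replicate (bl.length - k) (0:Int)).getD k 0 = RHS.getD k 0 :=
      getD_append_left _ _ _ _ (by omega)
    rw [hget, hrep]
    have hset : (RHS ++ (0:Int) :: List.replicate (bl.length - (k+1)) 0).set (k+1) (pvMin3 (prev.getD (k + 1) 0 + 1) (RHS.getD k 0 + 1)
            (prev.getD k 0 + (if ch = bl.getD k ' ' then 0 else 1)))
        = RHS ++ (pvMin3 (prev.getD (k + 1) 0 + 1) (RHS.getD k 0 + 1)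
            (prev.getD k 0 + (if ch = bl.getD k ' ' then 0 else 1))) :: List.replicate (bl.length - (k+1)) 0 := by
      have : k + 1 = RHS.length := by omega
      rw [this]
      simp
    rw [hset, pvMin3_comm]
    constructor
    · simp
    · simp [h2]

theorem pvRows_snoc (bl u : List Char) (ch : Char) :
    pvRows bl (u ++ [ch]) = pvStepRow bl (pvRows bl u) ch := by
  simp [pvRows, List.foldl_append]
-- B's scan finds the first prefix length within distance d
theorem scan_eq (bl : List Char) (d : Int) :
    ∀ (t u : List Char) (c : Nat),
      pvScan bl d (pvRows bl u) t c
        = ((List.range t.length).find? (fun k => decide (pvLev bl (u ++ t.take (k + 1)) ≤ d))).map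
            (fun k => c + k + 1) := by
  intro t
  induction t with
  | nil => intro u c; simp [pvScan]
  | cons ch t' ih =>
    intro u c
    rw [pvScan]
    have hrow : pvStepRow bl (pvRows bl u) ch = pvRows bl (u ++ [ch]) := (pvRows_snoc bl u ch).symm
    rw [hrow]
    have hlen : (ch :: t').length = t'.length + 1 := rfl
    rw [hlen, List.range_succ_eq_map]
    rw [List.find?_cons]
    by_cases h : (pvRows bl (u ++ [ch])).getD bl.length 0 ≤ d
    · have h0 : (fun k => decide (pvLev bl (u ++ (ch :: t').take (k + 1)) ≤ d)) 0 = true := by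
        simp only [List.take_succ_cons, List.take_zero, decide_eq_true_eq, pvLev]
        exact h
      rw [if_pos h]
      simp only [h0]
      simp
    · have h0 : (fun k => decide (pvLev bl (u ++ (ch :: t').take (k + 1)) ≤ d)) 0 = false := by
        simp only [List.take_succ_cons, List.take_zero, decide_eq_false_iff_not, pvLev]
        exact h
      rw [if_neg h]
      simp only [h0]
      rw [ih (u ++ [ch]) (c + 1)]
      rw [List.find?_map, Option.map_map]
      have hp : ((fun k => decide (pvLev bl (u ++ (ch :: t').take (k + 1)) ≤ d)) ∘ Nat.succ)
          = (fun k => decide (pvLev bl ((u ++ [ch]) ++ t'.take (k + 1)) ≤ d)) := by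
        funext k
        simp [Function.comp, List.take_succ_cons]
      have hg : ((fun k => c + k + 1) ∘ Nat.succ) = (fun k => c + 1 + k + 1) := by
        funext k; simp only [Function.comp]; omega
      rw [hp, hg]
-- bookkeeping: once the state holds a start ≤ i with a length no longer than every
-- remaining candidate, A's inner loop never updates again
theorem frozen (i : Nat) (q : Nat → Bool) :
    ∀ (l : List Nat) (st : Int × Int), st.1 ≠ -1 → st.1 ≤ (i : Int) →
      (∀ k ∈ l, st.2 ≤ (k : Int) + 1) →
      l.foldl (fun st k => if q k then
          (if ((i : Int) < st.1) ∨ (st.1 = -1) ∨ ((k : Int) + 1 < st.2) then ((i : Int), (k : Int) + 1) else st)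
        else st) st = st := by
  intro l
  induction l with
  | nil => intro st _ _ _; rfl
  | cons k l ih =>
    intro st h1 h2 h3
    simp only [List.foldl_cons]
    have h3k : st.2 ≤ (k : Int) + 1 := h3 k (by simp)
    have hcond : ¬ (((i : Int) < st.1) ∨ (st.1 = -1) ∨ ((k : Int) + 1 < st.2)) := by
      rintro (h | h | h) <;> omega
    have hstep : (if q k then
          (if ((i : Int) < st.1) ∨ (st.1 = -1) ∨ ((k : Int) + 1 < st.2) then ((i : Int), (k : Int) + 1) else st)
        else st) = st := by
      by_cases hq : q k <;> simp [hq, hcond]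
    rw [hstep]
    exact ih st h1 h2 (fun k' hk' => h3 k' (by simp [hk']))
-- A's inner loop = take the FIRST match (lengths are scanned in increasing order)
theorem inner_eq (i : Nat) (q : Nat → Bool) :
    ∀ (l : List Nat), l.Pairwise (· < ·) →
      ∀ (st : Int × Int), (st.1 = -1 ∨ (0 ≤ st.1 ∧ st.1 ≤ (i : Int))) →
      l.foldl (fun st k => if q k then
          (if ((i : Int) < st.1) ∨ (st.1 = -1) ∨ ((k : Int) + 1 < st.2) then ((i : Int), (k : Int) + 1) else st)
        else st) st
        = (match l.find? q with
          | none => st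
          | some k => if st.1 = -1 ∨ ((k : Int) + 1 < st.2) then ((i : Int), (k : Int) + 1) else st) := by
  intro l
  induction l with
  | nil => intro _ st _; rfl
  | cons k l ih =>
    intro hpw st hst
    have hpw' := (List.pairwise_cons.mp hpw).2
    have hlt : ∀ k' ∈ l, k < k' := (List.pairwise_cons.mp hpw).1
    simp only [List.foldl_cons, List.find?_cons]
    by_cases hq : q k
    · simp only [hq, if_pos]
      have hilt : ¬ ((i : Int) < st.1) := by rcases hst with h | ⟨h1, h2⟩ <;> omega
      by_cases hc : st.1 = -1 ∨ ((k : Int) + 1 < st.2)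
      · have hcc : (((i : Int) < st.1) ∨ (st.1 = -1) ∨ ((k : Int) + 1 < st.2)) := by tauto
        rw [if_pos hcc]
        rw [frozen i q l ((i : Int), (k : Int) + 1)
          (show ((i : Int)) ≠ -1 by omega)
          (show ((i : Int)) ≤ (i : Int) from le_refl _)
          (fun k' hk' => show ((k : Int) + 1) ≤ (k' : Int) + 1 by
            have := hlt k' hk'; omega)]
        simp [hc]
      · have hne : st.1 ≠ -1 := fun h => hc (Or.inl h)
        have hle : st.1 ≤ (i : Int) := by rcases hst with h | ⟨h1, h2⟩; exacts [absurd h hne, h2]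
        have hcc : ¬ (((i : Int) < st.1) ∨ (st.1 = -1) ∨ ((k : Int) + 1 < st.2)) := by tauto
        rw [if_neg hcc]
        rw [frozen i q l st hne hle (fun k' hk' => by
          have := hlt k' hk'
          have h2 : ¬ ((k : Int) + 1 < st.2) := fun h => hc (Or.inr h)
          omega)]
        simp [hc]
    · simp only [hq]
      simp only [Bool.false_eq_true, if_false]
      exact ih hpw' st hst

theorem row_loop_eq (bl : List Char) (prev : List Int) (ch : Char) :
    (List.range bl.length).foldl (fun r j0 =>
        r.set (j0 + 1) (pvMin3 (prev.getD (j0 + 1) 0 + 1) (r.getD j0 0 + 1)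
          (prev.getD j0 0 + (if ch = bl.getD j0 ' ' then 0 else 1))))
      ((prev.getD 0 0 + 1) :: List.replicate bl.length 0)
      = pvStepRow bl prev ch := by
  have h := (row_loop_aux bl prev ch bl.length (le_refl _)).1
  simpa [pvStepRow] using h

theorem set_append_len {α : Type} (xs : List α) (x0 v : α) (ys : List α) (n : Nat)
    (h : n = xs.length) : (xs ++ x0 :: ys).set n v = xs ++ v :: ys := by
  subst h; simp

theorem getD_append_len {α : Type} (xs : List α) (x0 : α) (ys : List α) (d : α) (n : Nat)
    (h : n = xs.length) : (xs ++ x0 :: ys).getD n d = x0 := by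
  subst h
  rw [List.getD_append_right xs (x0 :: ys) d xs.length (le_refl _)]
  simp

theorem foldl_set_range {α : Type} (g : Nat → α → α) (dflt : α) (x0 : α) (N : Nat) :
    ∀ k, k ≤ N → (List.range k).foldl (fun xs i => xs.set i (g i (xs.getD i dflt))) (List.replicate N x0)
      = (List.range k).map (fun i => g i x0) ++ List.replicate (N - k) x0 := by
  intro k
  induction k with
  | zero => intro _; simp
  | succ k ih =>
    intro hk
    rw [List.range_succ, List.foldl_append, List.foldl_cons, List.foldl_nil, ih (by omega)]
    have hrep : List.replicate (N - k) x0 = x0 :: List.replicate (N - (k+1)) x0 := by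
      have : N - k = (N - (k+1)) + 1 := by omega
      rw [this, List.replicate_succ]
    rw [hrep]
    rw [getD_append_len _ _ _ _ _ (by simp), set_append_len _ _ _ _ _ (by simp)]
    simp [List.map_append]
-- A's table-filling levenshtein equals B's row-iteration distance
theorem lev_eq (s1 s2 : List Char) : levenshtein s1 s2 = pvLev s2 s1 := by
  dsimp only [levenshtein]
  set m := s1.length with hm
  set n := s2.length with hn
  set h : Nat → List Int := fun i => (i : Int) :: List.replicate n 0 with hh
  set f : Nat → List Int := fun i => pvRows s2 (s1.take i) with hf
  -- dp1
  have hdp1 := foldl_set_range (fun i r => r.set 0 ((i : Nat) : Int)) ([] : List Int)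
    (List.replicate (n+1) (0:Int)) (m+1) (m+1) (le_refl _)
  simp only [] at hdp1
  have hx0 : ∀ i : Nat, (List.replicate (n+1) (0:Int)).set 0 (i : Int) = h i := by
    intro i; rw [List.replicate_succ]; rfl
  rw [Nat.sub_self, List.replicate_zero, List.append_nil] at hdp1
  have hdp1' : (List.range (m+1)).foldl (fun dp i => dp.set i ((dp.getD i []).set 0 (i : Int)))
      (List.replicate (m+1) (List.replicate (n+1) (0:Int)))
      = (List.range (m+1)).map h := by
    rw [hdp1]; exact List.map_congr_left (fun i _ => hx0 i)
  rw [hdp1']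
  -- dp2
  have hget0 : ((List.range (m+1)).map h).getD 0 [] = h 0 :=
    PySem.List.getD_map_range h (m+1) 0 [] (by omega)
  have hdp2 := foldl_set_row 0 1 ([] : List Int) (fun j r _ => r.set j ((j : Nat) : Int))
    (by omega) (List.range (n+1)) ((List.range (m+1)).map h) (by simp)
  simp only [] at hdp2
  rw [hdp2]
  have hrow0 : (List.range (n+1)).foldl (fun r j => r.set j ((j : Nat) : Int))
      (((List.range (m+1)).map h).getD 0 []) = pvRow0 n := by
    rw [hget0]
    have : h 0 = List.replicate (n+1) (0:Int) := by
      rw [List.replicate_succ]; rfl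
    rw [this]
    have := foldl_set_range (fun j (_ : Int) => ((j : Nat) : Int)) (0 : Int) (0 : Int) (n+1) (n+1) (le_refl _)
    simp only [] at this
    rw [this, Nat.sub_self, List.replicate_zero, List.append_nil, pvRow0]
  rw [hrow0]
  -- main loop
  have houter : ∀ k, k ≤ m →
      (List.range k).foldl (fun dp i0 =>
        (List.range n).foldl (fun dp j0 =>
          dp.set (i0 + 1) ((dp.getD (i0 + 1) []).set (j0 + 1)
            (pvMin3 ((dp.getD i0 []).getD (j0 + 1) 0 + 1)
                    ((dp.getD (i0 + 1) []).getD j0 0 + 1)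
                    ((dp.getD i0 []).getD j0 0 + (if s1.getD i0 ' ' = s2.getD j0 ' ' then 0 else 1))))) dp)
        (((List.range (m+1)).map h).set 0 (pvRow0 n))
      = (List.range (k+1)).map f ++ (List.range (m-k)).map (fun t => h (k+1+t)) := by
    intro k
    induction k with
    | zero =>
      intro _
      have hsplit : (List.range (m+1)).map h = h 0 :: (List.range m).map (fun t => h (t+1)) := by
        rw [List.range_succ_eq_map, List.map_cons, List.map_map]
        rfl
      simp only [List.range_zero, List.foldl_nil]
      rw [hsplit]
      have : (h 0 :: (List.range m).map (fun t => h (t+1))).set 0 (pvRow0 n)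
          = pvRow0 n :: (List.range m).map (fun t => h (t+1)) := rfl
      rw [this]
      have hf0 : f 0 = pvRow0 n := rfl
      rw [← hf0]
      simp only [Nat.sub_zero]
      rw [show List.range 1 = [0] from rfl]
      simp only [List.map_cons, List.map_nil, List.cons_append, List.nil_append]
      congr 1
      exact List.map_congr_left (fun t _ => by rw [Nat.add_comm])
    | succ k ih =>
      intro hk
      rw [show List.range (k+1) = List.range k ++ [k] from List.range_succ, List.foldl_append,
        List.foldl_cons, List.foldl_nil, ih (by omega)]
      set A := (List.range (k+1)).map f with hA
      have hAlen : A.length = k + 1 := by simp [hA]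
      have htail : (List.range (m-k)).map (fun t => h (k+1+t))
          = h (k+1) :: (List.range (m-(k+1))).map (fun t => h (k+2+t)) := by
        have h1 : m - k = (m - (k+1)) + 1 := by omega
        rw [h1, List.range_succ_eq_map, List.map_cons, List.map_map]
        congr 1
        exact List.map_congr_left (fun t _ => by show h (k+1+(t+1)) = h (k+2+t); congr 1; omega)
      rw [htail]
      -- factor the inner loop
      have hfr := foldl_set_row (k+1) k ([] : List Int)
        (fun j0 r p => r.set (j0 + 1)
          (pvMin3 (p.getD (j0 + 1) 0 + 1) (r.getD j0 0 + 1)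
            (p.getD j0 0 + (if s1.getD k ' ' = s2.getD j0 ' ' then 0 else 1))))
        (by omega) (List.range n) (A ++ h (k+1) :: (List.range (m-(k+1))).map (fun t => h (k+2+t)))
        (by simp [hAlen])
      simp only [] at hfr
      rw [hfr]
      have hprev : (A ++ h (k+1) :: (List.range (m-(k+1))).map (fun t => h (k+2+t))).getD k [] = f k := by
        rw [getD_append_left _ _ _ _ (by omega), hA]
        exact PySem.List.getD_map_range f (k+1) k [] (by omega)
      have hstart : (A ++ h (k+1) :: (List.range (m-(k+1))).map (fun t => h (k+2+t))).getD (k+1) [] = h (k+1) :=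
        getD_append_len _ _ _ _ _ hAlen.symm
      rw [hprev, hstart]
      have hheadf : (f k).getD 0 0 = (k : Int) := by
        rw [hf]
        have := pvRows_head s2 (s1.take k)
        rwa [List.length_take, min_eq_left (by omega)] at this
      have hhk : h (k+1) = ((f k).getD 0 0 + 1) :: List.replicate n 0 := by
        rw [hh, hheadf]
        push_cast
        ring_nf
      rw [hhk]
      rw [row_loop_eq s2 (f k) (s1.getD k ' ')]
      have hstep : pvStepRow s2 (f k) (s1.getD k ' ') = f (k+1) := by
        rw [hf]
        simp only []
        have htake : s1.take (k+1) = s1.take k ++ [s1.getD k ' '] := by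
          rw [List.take_add_one]
          congr 1
          rw [List.getElem?_eq_getElem (by omega)]
          simp [List.getD, List.getElem?_eq_getElem (show k < s1.length by omega)]
        rw [htake, pvRows_snoc]
      rw [hstep]
      rw [set_append_len _ _ _ _ _ hAlen.symm, hA]
      rw [show List.range (k+1+1) = List.range (k+1) ++ [k+1] from List.range_succ, List.map_append]
      simp
  have hfinal := houter m (le_refl _)
  rw [Nat.sub_self] at hfinal
  simp only [List.range_zero, List.map_nil, List.append_nil] at hfinal
  rw [hfinal]
  have : ((List.range (m+1)).map f).getD m [] = f m :=
    PySem.List.getD_map_range f (m+1) m [] (by omega)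
  rw [this, hf]
  simp only []
  rw [show List.take m s1 = s1 from by rw [hm]; exact List.take_length]
  rfl
-- canonical form of one outer step, shared by both ports
theorem astep_eq (al bl : List Char) (d : Int) (i : Nat) (hi : i < al.length) (st : Int × Int) :
    (PySem.List.pyRange ((i : Int) + 1) ((al.length : Int) + 1) 1).foldl (fun st c =>
      let s := PySem.List.slice al (some (i : Int)) (some c)
      let distance := levenshtein s bl
      if distance ≤ d then
        if ((i : Int) < st.1) ∨ (st.1 = -1) ∨ ((s.length : Int) < st.2) then ((i : Int), (s.length : Int))
        else st
      else st) st
    = (List.range (al.length - i)).foldl (fun st k =>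
        if (fun k => decide (pvLev bl ((al.drop i).take (k+1)) ≤ d)) k then
          (if ((i : Int) < st.1) ∨ (st.1 = -1) ∨ ((k : Int) + 1 < st.2) then ((i : Int), (k : Int) + 1) else st)
        else st) st := by
  rw [PySem.List.pyRange_one]
  have hcnt : (((al.length : Int) + 1) - ((i : Int) + 1)).toNat = al.length - i := by omega
  rw [hcnt, List.foldl_map]
  apply PySem.List.foldl_congr_mem
  intro st k hk
  have hklt : k < al.length - i := List.mem_range.mp hk
  have hc : (i : Int) + 1 + (k : Int) = ((i + 1 + k : Nat) : Int) := by push_cast; ring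
  rw [hc]
  have hslice : PySem.List.slice al (some ((i : Nat) : Int)) (some ((i + 1 + k : Nat) : Int))
      = (al.drop i).take (k + 1) := by
    rw [PySem.List.slice_natCast]
    congr 1
    omega
  simp only [hslice]
  have hlen : ((al.drop i).take (k + 1)).length = k + 1 := by
    rw [List.length_take, List.length_drop]
    omega
  rw [hlen, lev_eq]
  by_cases hd : pvLev bl ((al.drop i).take (k + 1)) ≤ d
  · simp only [hd, decide_true, if_pos]
    push_cast
    rfl

  · simp [hd]

theorem bstep_eq (al bl : List Char) (d : Int) (i : Nat) (st : Int × Int) :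
    (match pvScan bl d (pvRow0 bl.length) (al.drop i) 0 with
    | none => st
    | some L => if st.1 = -1 ∨ ((L : Int) < st.2) then ((i : Int), (L : Int)) else st)
    = (match (List.range (al.length - i)).find? (fun k => decide (pvLev bl ((al.drop i).take (k+1)) ≤ d)) with
      | none => st
      | some k => if st.1 = -1 ∨ ((k : Int) + 1 < st.2) then ((i : Int), (k : Int) + 1) else st) := by
  have h0 : pvRow0 bl.length = pvRows bl [] := rfl
  rw [h0, scan_eq bl d (al.drop i) [] 0]
  have hl : (al.drop i).length = al.length - i := List.length_drop
  rw [hl]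
  have hp : (fun k => decide (pvLev bl ([] ++ (al.drop i).take (k+1)) ≤ d))
      = (fun k => decide (pvLev bl ((al.drop i).take (k+1)) ≤ d)) := by
    funext k; rw [List.nil_append]
  rw [hp]
  cases hfind : (List.range (al.length - i)).find? (fun k => decide (pvLev bl ((al.drop i).take (k+1)) ≤ d)) with
  | none => simp
  | some k =>
    simp only [Option.map_some]
    have : ((0 + k + 1 : Nat) : Int) = (k : Int) + 1 := by push_cast; ring
    rw [this]
-- both outer folds agree, with the invariant that the best start so far is -1 or < N
theorem main_fold (al bl : List Char) (d : Int) :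
    ∀ N, N ≤ al.length →
      ((List.range N).foldl (fun (st : Int × Int) (i : Nat) =>
        (PySem.List.pyRange ((i : Int) + 1) ((al.length : Int) + 1) 1).foldl (fun st c =>
          let s := PySem.List.slice al (some (i : Int)) (some c)
          let distance := levenshtein s bl
          if distance ≤ d then
            if ((i : Int) < st.1) ∨ (st.1 = -1) ∨ ((s.length : Int) < st.2) then ((i : Int), (s.length : Int))
            else st
          else st) st) ((-1 : Int), (0 : Int))
      = (List.range N).foldl (fun (st : Int × Int) (i : Nat) =>
          match pvScan bl d (pvRow0 bl.length) (al.drop i) 0 with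
          | none => st
          | some L => if st.1 = -1 ∨ ((L : Int) < st.2) then ((i : Int), (L : Int)) else st)
          ((-1 : Int), (0 : Int)))
      ∧ (let r := (List.range N).foldl (fun (st : Int × Int) (i : Nat) =>
          match pvScan bl d (pvRow0 bl.length) (al.drop i) 0 with
          | none => st
          | some L => if st.1 = -1 ∨ ((L : Int) < st.2) then ((i : Int), (L : Int)) else st)
          ((-1 : Int), (0 : Int));
          r.1 = -1 ∨ (0 ≤ r.1 ∧ r.1 + 1 ≤ (N : Int))) := by
  intro N
  induction N with
  | zero => exact fun _ => ⟨rfl, Or.inl rfl⟩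
  | succ N ih =>
    intro hN
    obtain ⟨heq, hinv⟩ := ih (by omega)
    simp only [] at hinv
    constructor
    · rw [show List.range (N+1) = List.range N ++ [N] from List.range_succ]
      rw [List.foldl_append, List.foldl_append]
      simp only [List.foldl_cons, List.foldl_nil]
      rw [heq]
      set st := (List.range N).foldl (fun (st : Int × Int) (i : Nat) =>
          match pvScan bl d (pvRow0 bl.length) (al.drop i) 0 with
          | none => st
          | some L => if st.1 = -1 ∨ ((L : Int) < st.2) then ((i : Int), (L : Int)) else st)
          ((-1 : Int), (0 : Int)) with hst
      rw [astep_eq al bl d N (by omega) st, bstep_eq al bl d N st]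
      rw [inner_eq N _ (List.range (al.length - N)) List.pairwise_lt_range st
        (by rcases hinv with h | ⟨h1, h2⟩; exacts [Or.inl h, Or.inr ⟨h1, by omega⟩])]
    · rw [show List.range (N+1) = List.range N ++ [N] from List.range_succ]
      rw [List.foldl_append]
      simp only [List.foldl_cons, List.foldl_nil]
      set st := (List.range N).foldl (fun (st : Int × Int) (i : Nat) =>
          match pvScan bl d (pvRow0 bl.length) (al.drop i) 0 with
          | none => st
          | some L => if st.1 = -1 ∨ ((L : Int) < st.2) then ((i : Int), (L : Int)) else st)
          ((-1 : Int), (0 : Int)) with hst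
      cases hscan : pvScan bl d (pvRow0 bl.length) (al.drop N) 0 with
      | none =>
        simp only []
        rcases hinv with h | ⟨h1, h2⟩
        · exact Or.inl h
        · exact Or.inr ⟨h1, by omega⟩
      | some L =>
        simp only []
        by_cases hc : st.1 = -1 ∨ ((L : Int) < st.2)
        · rw [if_pos hc]
          exact Or.inr ⟨by omega, by simp⟩
        · rw [if_neg hc]
          rcases hinv with h | ⟨h1, h2⟩
          · exact Or.inl h
          · exact Or.inr ⟨h1, by omega⟩

theorem find_ss_eq (a b : String) (d : Int) : find_ss a b d = find_ss_alt a b d := by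
  dsimp only [find_ss, find_ss_alt]
  rw [(main_fold a.toList b.toList d a.toList.length (le_refl _)).1]

-- ===== VERDICT (by name: the statement is the Claim_ definition above) =====
theorem find_ss_spec : Claim_equal_find_ss := by
  intro a b d _
  unfold Spec_find_ss
  exact find_ss_eq a b d
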